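-- pv_equiv track=rewrite | github.com/aasimkhan02/EVUA | engine/pipeline/transformation/rules/angularjs/http_to_httpclient.py | _infer_prop_name
-- ===== SOURCE A (Python) =====
-- def _infer_prop_name(url) -> str:
--     """
--     Infer the most likely $scope property name from a URL.
--     /api/products        → products
--     /api/admin/users     → users
--     /api/admin/settings  → settings
--     /api/orders          → orders
--     None                 → data
--     """
--     if not url:
--         return "data"
--     segments = [s for s in url.strip("/").split("/") if s and s != "api"]
--     # Skip path params like :id
--     clean = [s for s in segments if not s.startswith(":")]
--     if not clean:
--         return "data"
--     last = clean[-1].replace("-", "_")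
--     # camelCase if contains underscore
--     parts = last.split("_")
--     return parts[0] + "".join(p.capitalize() for p in parts[1:])
-- ===== SOURCE B (Python) =====
-- def _infer_prop_name(url) -> str:
--     """Single left-to-right character automaton: tracks the current path segment and
--     the last acceptable one while scanning, then emits camelCase char by char."""
--     if not url:
--         return "data"
--     cand = ""
--     cur = ""
--     for ch in url + "/":
--         if ch == "/":
--             if cur and cur != "api" and cur[0] != ":":
--                 cand = cur
--             cur = ""
--         else:
--             cur += ch
--     if not cand:
--         return "data"
--     out = []
--     state = 0  # 0 = first part, 1 = just after a separator, 2 = inside a later part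
--     for ch in cand:
--         if ch == "-" or ch == "_":
--             state = 1
--         elif state == 0:
--             out.append(ch)
--         elif state == 1:
--             out.append(ch.upper())
--             state = 2
--         else:
--             out.append(ch.lower())
--     return "".join(out)
-- ===== Notes on version B (the rewrite author's own statement) =====
-- stated objective: alternative
-- what changed: Replaces A's split/strip/two-filters/last/replace/split/capitalize pipeline by two character-level automata: one pass over the raw URL tracking the current and last acceptable segment, and a three-state pass over the winner that emits camelCase char by char.
import Mathlib
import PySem

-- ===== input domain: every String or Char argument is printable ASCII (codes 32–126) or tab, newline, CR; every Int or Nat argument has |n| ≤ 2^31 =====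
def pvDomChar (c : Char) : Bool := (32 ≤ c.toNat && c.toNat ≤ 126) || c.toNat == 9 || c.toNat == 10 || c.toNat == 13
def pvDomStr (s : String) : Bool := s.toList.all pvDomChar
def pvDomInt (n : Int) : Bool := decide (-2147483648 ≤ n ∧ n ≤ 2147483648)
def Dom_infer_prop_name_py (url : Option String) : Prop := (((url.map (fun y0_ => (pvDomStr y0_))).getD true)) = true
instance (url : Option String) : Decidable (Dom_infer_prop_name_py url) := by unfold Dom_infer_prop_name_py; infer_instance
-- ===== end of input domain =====

-- B replaces A's split/filter/filter/last/replace/split/capitalize pipeline by two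
-- character-level automata: one pass over the raw URL that tracks the current segment and
-- the last acceptable one, and one pass over the winner that emits camelCase char by char.

-- ===== PORT A =====
-- A's str.capitalize (exact on the ASCII domain: first char upper, rest lower)
def pyCap (cs : List Char) : List Char :=
  match cs with
  | [] => []
  | c :: rest => PySem.Chars.upperChar c :: PySem.Chars.lower rest

-- A's `parts = last.split("_"); return parts[0] + "".join(p.capitalize() for p in parts[1:])`
def camelOf (last : List Char) : String :=
  match PySem.Chars.splitOn last ['_'] with
  | [] => ""            -- unreachable: split on a nonempty separator is never empty
  | p :: ps => String.ofList (p ++ PySem.Chars.join [] (ps.map pyCap))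

def infer_prop_name_py (url : Option String) : String :=
  match url with
  | none => "data"
  | some u =>
    if u.toList = [] then "data"
    else
      let segments := (PySem.Chars.splitOn (PySem.Chars.stripChars u.toList ['/']) ['/']).filter
        (fun s => decide (s ≠ [] ∧ s ≠ "api".toList))
      let clean := segments.filter (fun s => !PySem.Chars.startswith s [':'])
      match clean.getLast? with
      | none => "data"
      | some last => camelOf (PySem.Chars.replace last ['-'] ['_'])

-- ===== PORT B =====
-- `for ch in url + "/"`, carrying (cur, cand); cur[0] is read only under the `cur` guard
def pvSegLoop (cs : List Char) (cur cand : List Char) : List Char :=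
  match cs with
  | [] => cand
  | c :: rest =>
    if c = '/' then
      pvSegLoop rest []
        (if cur ≠ [] ∧ cur ≠ "api".toList ∧ cur.headD ' ' ≠ ':' then cur else cand)
    else pvSegLoop rest (cur ++ [c]) cand

-- `for ch in cand`, three-state camelCase emitter (0 first part, 1 after separator, 2 inside)
def pvCamelLoop (cs : List Char) (state : Nat) : List Char :=
  match cs with
  | [] => []
  | c :: rest =>
    if c = '-' ∨ c = '_' then pvCamelLoop rest 1
    else if state = 0 then c :: pvCamelLoop rest 0
    else if state = 1 then PySem.Chars.upperChar c :: pvCamelLoop rest 2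
    else PySem.Chars.lowerChar c :: pvCamelLoop rest 2

def infer_prop_name_py_alt (url : Option String) : String :=
  match url with
  | none => "data"
  | some u =>
    if u.toList = [] then "data"
    else
      let cand := pvSegLoop (u.toList ++ ['/']) [] []
      if cand = [] then "data"
      else String.ofList (pvCamelLoop cand 0)

-- ===== PRECONDITION & SPEC =====
def Spec_infer_prop_name_py (url : Option String) (out : String) : Prop := out = infer_prop_name_py_alt url
instance (url : Option String) (out : String) : Decidable (Spec_infer_prop_name_py url out) := by unfold Spec_infer_prop_name_py; infer_instance

-- ===== CLAIM (what is proved, stated in full; the proofs are below) =====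
def Claim_equal_infer_prop_name_py : Prop := ∀ (url : Option String), Dom_infer_prop_name_py url → Spec_infer_prop_name_py url (infer_prop_name_py url)

-- ===== LEMMAS AND PROOFS =====

-- structural model of Python's split on a single separator character
def sp1 (d : Char) : List Char → List (List Char)
  | [] => [[]]
  | c :: cs =>
    if c = d then [] :: sp1 d cs
    else match sp1 d cs with
      | [] => [[c]]
      | p :: ps => (c :: p) :: ps

lemma sp1_ne_nil (d : Char) (cs : List Char) : sp1 d cs ≠ [] := by
  cases cs with
  | nil => simp [sp1]
  | cons c cs =>
    simp only [sp1]
    split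
    · simp
    · split <;> simp_all

lemma sp1_cons_shape (d : Char) (cs : List Char) : ∃ p ps, sp1 d cs = p :: ps := by
  cases hs : sp1 d cs with
  | nil => exact absurd hs (sp1_ne_nil d cs)
  | cons p ps => exact ⟨p, ps, rfl⟩

-- prepend to the first block
def consFirst (cur : List Char) : List (List Char) → List (List Char)
  | [] => [cur]
  | p :: ps => (cur ++ p) :: ps

lemma splitOn_go_eq (d : Char) : ∀ (fuel : ℕ) (l cur : List Char) (acc : List (List Char)), l.length < fuel →
    PySem.Chars.splitOn.go [d] fuel l cur acc = acc.reverse ++ consFirst cur.reverse (sp1 d l) := by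
  intro fuel
  induction fuel with
  | zero => intro l cur acc h; exact absurd h (Nat.not_lt_zero _)
  | succ n ih =>
    intro l cur acc h
    cases l with
    | nil => simp [PySem.Chars.splitOn.go, sp1, consFirst]
    | cons c rest =>
      rw [PySem.Chars.splitOn.go]
      by_cases hc : c = d
      · subst hc
        have hpre : List.isPrefixOf [c] (c :: rest) = true := by simp [List.isPrefixOf]
        simp only [hpre, if_pos, List.length_cons, List.length_nil, List.drop_succ_cons,
          List.drop_zero]
        rw [ih rest [] (cur.reverse :: acc) (by simpa using Nat.lt_of_succ_lt_succ h)]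
        obtain ⟨p, ps, hsp⟩ := sp1_cons_shape c rest
        simp [sp1, hsp, consFirst]
      · have hpre : List.isPrefixOf [d] (c :: rest) = false := by
          simp [List.isPrefixOf]; exact fun hdc => absurd hdc.symm hc
        simp only [hpre, Bool.false_eq_true, if_false]
        rw [ih rest (c :: cur) acc (by simpa using Nat.lt_of_succ_lt_succ h)]
        obtain ⟨p, ps, hsp⟩ := sp1_cons_shape d rest
        simp [sp1, hc, hsp, consFirst]

lemma splitOn_eq_sp1 (d : Char) (s : List Char) : PySem.Chars.splitOn s [d] = sp1 d s := by
  rw [PySem.Chars.splitOn, splitOn_go_eq d (s.length+1) s [] [] (by omega)]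
  obtain ⟨p, ps, hsp⟩ := sp1_cons_shape d s
  simp [hsp, consFirst]

-- the combined acceptance predicate of both of A's filters (and of B's scan)
def pvQ (s : List Char) : Bool :=
  decide (s ≠ [] ∧ s ≠ "api".toList) && !PySem.Chars.startswith s [':']

lemma pvQ_nil : pvQ [] = false := by decide

lemma filter_filter_eq (xs : List (List Char)) :
    (xs.filter (fun s => decide (s ≠ [] ∧ s ≠ "api".toList))).filter
      (fun s => !PySem.Chars.startswith s [':']) = xs.filter pvQ := by
  rw [List.filter_filter]
  apply List.filter_congr
  intro s _
  simp [pvQ, Bool.and_comm]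

lemma sp1_append_sep (d : Char) (s : List Char) : sp1 d (s ++ [d]) = sp1 d s ++ [[]] := by
  induction s with
  | nil => simp [sp1]
  | cons c cs ih =>
    by_cases hc : c = d
    · simp [sp1, hc, ih]
    · obtain ⟨p, ps, hsp⟩ := sp1_cons_shape d cs
      simp [sp1, hc, ih, hsp]

lemma filter_sp1_dropWhile (s : List Char) :
    (sp1 '/' (s.dropWhile (fun c => (['/'].contains c)))).filter pvQ = (sp1 '/' s).filter pvQ := by
  induction s with
  | nil => rfl
  | cons c cs ih =>
    by_cases hc : c = '/'
    · subst hc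
      rw [List.dropWhile_cons_of_pos (by simp)]
      rw [ih]
      simp [sp1, pvQ_nil]
    · rw [List.dropWhile_cons_of_neg (by simp [hc])]

lemma filter_sp1_rdropWhile (s : List Char) :
    (sp1 '/' (s.rdropWhile (fun c => (['/'].contains c)))).filter pvQ = (sp1 '/' s).filter pvQ := by
  induction s using List.reverseRecOn with
  | nil => rfl
  | append_singleton s c ih =>
    by_cases hc : c = '/'
    · subst hc
      rw [List.rdropWhile_concat_pos _ _ _ (by simp)]
      rw [ih, sp1_append_sep, List.filter_append]
      simp [pvQ_nil]
    · rw [List.rdropWhile_concat_neg _ _ _ (by simp [hc])]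

lemma filter_sp1_strip (s : List Char) :
    (sp1 '/' (PySem.Chars.stripChars s ['/'])).filter pvQ = (sp1 '/' s).filter pvQ := by
  have : PySem.Chars.stripChars s ['/'] =
      (s.dropWhile (fun c => (['/'].contains c))).rdropWhile (fun c => (['/'].contains c)) := by
    simp [PySem.Chars.stripChars, List.rdropWhile]
  rw [this, filter_sp1_rdropWhile, filter_sp1_dropWhile]

-- B's guard agrees with pvQ
lemma guard_iff_pvQ (cur : List Char) :
    (cur ≠ [] ∧ cur ≠ "api".toList ∧ cur.headD ' ' ≠ ':') ↔ pvQ cur = true := by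
  cases cur with
  | nil => simp [pvQ]
  | cons c r =>
    simp [pvQ, PySem.Chars.startswith, List.isPrefixOf]
    tauto

-- B's segment scan computes the last pvQ-accepted block of sp1
lemma pvSegLoop_spec : ∀ (cs cur cand : List Char),
    pvSegLoop (cs ++ ['/']) cur cand = ((consFirst cur (sp1 '/' cs)).filter pvQ).getLastD cand := by
  intro cs
  induction cs with
  | nil =>
    intro cur cand
    simp only [List.nil_append, pvSegLoop, guard_iff_pvQ, sp1, consFirst, List.append_nil]
    by_cases hq : pvQ cur = true <;> simp [hq, List.filter]
  | cons c cs ih =>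
    intro cur cand
    obtain ⟨p, ps, hsp⟩ := sp1_cons_shape '/' cs
    by_cases hc : c = '/'
    · subst hc
      simp only [List.cons_append, pvSegLoop, guard_iff_pvQ, ih]
      rw [show sp1 '/' ('/' :: cs) = [] :: sp1 '/' cs from by simp [sp1]]
      simp only [consFirst, hsp, List.append_nil, List.nil_append]
      by_cases hq : pvQ cur = true
      · simp only [hq, List.filter_cons, if_true, List.getLastD_cons]
      · simp [hq, List.filter_cons]
    · simp only [List.cons_append, pvSegLoop, if_neg hc, ih]
      rw [show sp1 '/' (c :: cs) = (c :: p) :: ps from by simp [sp1, hc, hsp]]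
      simp [consFirst, hsp]

-- Python's replace with single-char pattern is a map
def repl (c : Char) : Char := if c = '-' then '_' else c

lemma replace_go_eq : ∀ (fuel : ℕ) (l acc : List Char), l.length ≤ fuel →
    PySem.Chars.replace.go ['-'] ['_'] fuel l acc = acc.reverse ++ l.map repl := by
  intro fuel
  induction fuel with
  | zero =>
    intro l acc h
    have : l = [] := List.length_eq_zero_iff.mp (Nat.le_zero.mp h)
    subst this
    simp [PySem.Chars.replace.go]
  | succ n ih =>
    intro l acc h
    cases l with
    | nil => simp [PySem.Chars.replace.go]
    | cons c t =>
      rw [PySem.Chars.replace.go]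
      by_cases hc : c = '-'
      · subst hc
        have hpre : List.isPrefixOf ['-'] ('-' :: t) = true := by simp [List.isPrefixOf]
        simp only [hpre, if_pos, List.length_cons, List.length_nil, List.drop_succ_cons,
          List.drop_zero]
        rw [ih t _ (by simpa using Nat.le_of_succ_le_succ h)]
        simp [repl]
      · have hpre : List.isPrefixOf ['-'] (c :: t) = false := by
          simp [List.isPrefixOf]; exact fun hdc => absurd hdc.symm hc
        simp only [hpre, Bool.false_eq_true, if_false]
        rw [ih t _ (by simpa using Nat.le_of_succ_le_succ h)]
        simp [repl, hc]

lemma replace_eq_map (s : List Char) : PySem.Chars.replace s ['-'] ['_'] = s.map repl := by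
  rw [PySem.Chars.replace]
  simp only [List.isEmpty_cons, Bool.false_eq_true, if_false]
  exact replace_go_eq s.length s [] (Nat.le_refl _)

lemma join_nil_eq_flatten (parts : List (List Char)) :
    PySem.Chars.join [] parts = parts.flatten := by
  induction parts with
  | nil => rfl
  | cons a as ih =>
    cases as with
    | nil => simp [PySem.Chars.join, List.intercalate]
    | cons b bs =>
      rw [List.flatten_cons, ← ih, PySem.Chars.join_cons_cons]
      simp

-- the camel automaton against split-on-'_' of the replaced string, all three states at once
lemma pvCamelLoop_spec : ∀ (s : List Char) (p : List Char) (ps : List (List Char)),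
    sp1 '_' (s.map repl) = p :: ps →
      pvCamelLoop s 0 = p ++ (ps.map pyCap).flatten ∧
      pvCamelLoop s 1 = ((p :: ps).map pyCap).flatten ∧
      pvCamelLoop s 2 = PySem.Chars.lower p ++ (ps.map pyCap).flatten := by
  intro s
  induction s with
  | nil =>
    intro p ps h
    simp only [List.map_nil, sp1] at h
    obtain ⟨hp, hps⟩ := List.cons.injEq .. ▸ h
    cases h
    simp [pvCamelLoop, pyCap, PySem.Chars.lower]
  | cons c s ih =>
    intro p ps h
    obtain ⟨p', ps', hsp⟩ := sp1_cons_shape '_' (s.map repl)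
    obtain ⟨ih0, ih1, ih2⟩ := ih p' ps' hsp
    by_cases hc : c = '-' ∨ c = '_'
    · have hrc : repl c = '_' := by
        rcases hc with h1 | h1 <;> simp [repl, h1]
      have h' : ([] : List Char) :: (p' :: ps') = p :: ps := by
        rw [← hsp, ← h, List.map_cons, hrc]; simp [sp1]
      obtain ⟨hp, hps⟩ := List.cons_eq_cons.mp h'
      subst hp; subst hps
      refine ⟨?_, ?_, ?_⟩ <;>
        simp [pvCamelLoop, hc, ih1, pyCap, PySem.Chars.lower]
    · have hc' : c ≠ '-' ∧ c ≠ '_' := not_or.mp hc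
      have hrc : repl c = c := by simp [repl, hc'.1]
      have h' : (c :: p') :: ps' = p :: ps := by
        rw [← h, List.map_cons, hrc]; simp [sp1, hc'.2, hsp]
      obtain ⟨hp, hps⟩ := List.cons_eq_cons.mp h'
      subst hp; subst hps
      refine ⟨?_, ?_, ?_⟩
      · simp [pvCamelLoop, hc'.1, hc'.2, ih0]
      · simp [pvCamelLoop, hc'.1, hc'.2, ih2, pyCap]
      · simp [pvCamelLoop, hc'.1, hc'.2, ih2, PySem.Chars.lower]

lemma camel_eq (s : List Char) :
    String.ofList (pvCamelLoop s 0) = camelOf (PySem.Chars.replace s ['-'] ['_']) := by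
  rw [replace_eq_map]
  obtain ⟨p, ps, hsp⟩ := sp1_cons_shape '_' (s.map repl)
  obtain ⟨h0, _, _⟩ := pvCamelLoop_spec s p ps hsp
  rw [camelOf, splitOn_eq_sp1, hsp]
  simp [h0, join_nil_eq_flatten]

-- ===== VERDICT (by name: the statement is the Claim_ definition above) =====
theorem infer_prop_name_py_spec : Claim_equal_infer_prop_name_py := by
  intro url _
  unfold Spec_infer_prop_name_py infer_prop_name_py infer_prop_name_py_alt
  match url with
  | none => rfl
  | some u =>
    by_cases hu : u.toList = []
    · simp [hu]
    · simp only [hu, if_false]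
      rw [splitOn_eq_sp1, filter_filter_eq, filter_sp1_strip]
      rw [pvSegLoop_spec u.toList [] []]
      obtain ⟨p, ps, hsp⟩ := sp1_cons_shape '/' u.toList
      rw [hsp, show consFirst [] (p :: ps) = p :: ps from by simp [consFirst]]
      rw [← hsp]
      cases hF : (sp1 '/' u.toList).filter pvQ with
      | nil => simp
      | cons f fs =>
        have hlast : (f :: fs).getLast? = some ((f :: fs).getLast (by simp)) :=
          List.getLast?_eq_some_getLast (by simp)
        have hmem : (f :: fs).getLast (by simp) ∈ (sp1 '/' u.toList).filter pvQ := by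
          rw [hF]; exact List.getLast_mem _
        have hq : pvQ ((f :: fs).getLast (by simp)) = true := List.of_mem_filter hmem
        have hne : (f :: fs).getLast (by simp) ≠ [] := by
          intro hnil
          rw [hnil] at hq
          simp [pvQ_nil] at hq
        rw [hlast]
        rw [List.getLastD_eq_getLast?, hlast]
        simp only [Option.getD_some]
        rw [if_neg hne]
        exact (camel_eq _).symm
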